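-- pv_equiv track=rewrite | github.com/Wy8827/librarySystemPython | assignment/member and staff.py | valid_isbn10
-- ===== SOURCE A (Python) =====
-- def valid_isbn10(s):
--     if len(s) != 10:
--         return False
--     total = 0
--     for i, ch in enumerate(s):
--         if i == 9 and ch in "Xx":
--             val = 10
--         elif ch.isdigit():
--             val = int(ch)
--         else:
--             return False
--         total += val * (10 - i)
--     return total % 11 == 0
-- ===== SOURCE B (Python) =====
-- def valid_isbn10(s):
--     if len(s) != 10:
--         return False
--     # Stage 1: decode characters into digit values (check digit may be X/x = 10).
--     vals = []
--     for ch in s[:9]: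
--         if not ch.isdigit():
--             return False
--         vals.append(int(ch))
--     last = s[9]
--     if last in "Xx":
--         vals.append(10)
--     elif last.isdigit():
--         vals.append(int(last))
--     else:
--         return False
--     # Stage 2: multiplication-free checksum via double accumulation:
--     # total = sum of running prefix sums = sum(v[i] * (10 - i)).
--     t = 0
--     total = 0
--     for v in vals:
--         t += v
--         total += t
--     return total % 11 == 0
-- ===== Notes on version B (the rewrite author's own statement) =====
-- stated objective: alternative
-- what changed: B first decodes the string into a list of digit values and then computes the checksum with a multiplication-free double accumulation (sum of running prefix sums equals the weighted sum), instead of A's single pass multiplying each digit by its weight 10-i.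
import Mathlib
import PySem

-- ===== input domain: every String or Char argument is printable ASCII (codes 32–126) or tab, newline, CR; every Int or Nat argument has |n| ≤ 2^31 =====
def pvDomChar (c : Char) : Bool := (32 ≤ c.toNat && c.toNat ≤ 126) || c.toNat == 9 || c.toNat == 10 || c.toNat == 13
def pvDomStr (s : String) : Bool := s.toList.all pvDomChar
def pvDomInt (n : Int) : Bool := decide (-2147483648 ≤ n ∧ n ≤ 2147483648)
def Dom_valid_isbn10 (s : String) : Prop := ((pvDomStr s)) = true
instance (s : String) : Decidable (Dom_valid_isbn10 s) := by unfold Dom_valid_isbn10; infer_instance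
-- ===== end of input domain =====

-- B decodes the string into a list of digit values first, then computes the checksum by a
-- multiplication-free double accumulation (objective: alternative algorithm; same cost).
-- int(ch) after ch.isdigit() is ported as (ch.toNat - 48); exact on ASCII digits (all of Dom).

-- ===== PORT A =====
-- the for-loop over enumerate(s), carrying (index, total); early `return False` = Bool result
def validIsbnGoA : List Char → Nat → Int → Bool
  | [], _, total => PySem.Int.mod total 11 == 0
  | ch :: rest, i, total =>
    if i == 9 && (ch == 'X' || ch == 'x') then
      validIsbnGoA rest (i + 1) (total + 10 * (10 - (i : Int)))
    else if PySem.Chars.isdigit ch then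
      validIsbnGoA rest (i + 1) (total + ((ch.toNat : Int) - 48) * (10 - (i : Int)))
    else false

def valid_isbn10 (s : String) : Bool :=
  if s.toList.length ≠ 10 then false
  else validIsbnGoA s.toList 0 0

-- ===== PORT B =====
-- stage 1, the loop over s[:9] appending to `vals`: none = early `return False`
def validIsbnDecodeB : List Char → List Int → Option (List Int)
  | [], vals => some vals
  | ch :: rest, vals =>
    if PySem.Chars.isdigit ch then
      validIsbnDecodeB rest (vals ++ [((ch.toNat : Int) - 48)])
    else none

-- stage 2, the double-accumulation loop over vals, carrying (t, total)
def validIsbnSumB : List Int → Int → Int → Int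
  | [], _, total => total
  | v :: rest, t, total => validIsbnSumB rest (t + v) (total + (t + v))

def valid_isbn10_alt (s : String) : Bool :=
  if s.toList.length ≠ 10 then false
  else
    match validIsbnDecodeB (PySem.List.slice s.toList none (some 9)) [] with
    | none => false
    | some vals =>
      match PySem.List.pyGet? s.toList 9 with
      | none => false
      | some last =>
        let vals' :=
          if last == 'X' || last == 'x' then some (vals ++ [(10 : Int)])
          else if PySem.Chars.isdigit last then some (vals ++ [((last.toNat : Int) - 48)])
          else none
        match vals' with
        | none => false
        | some vs => PySem.Int.mod (validIsbnSumB vs 0 0) 11 == 0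

-- ===== PRECONDITION & SPEC =====
def Spec_valid_isbn10 (s : String) (out : Bool) : Prop := out = valid_isbn10_alt s
instance (s : String) (out : Bool) : Decidable (Spec_valid_isbn10 s out) := by unfold Spec_valid_isbn10; infer_instance

-- ===== CLAIM (what is proved, stated in full; the proofs are below) =====
def Claim_equal_valid_isbn10 : Prop := ∀ (s : String), Dom_valid_isbn10 s → Spec_valid_isbn10 s (valid_isbn10 s)

-- ===== LEMMAS AND PROOFS =====

-- every length-10 list is ten explicit elements
theorem list_len10 (cs : List Char) (h : cs.length = 10) :
    ∃ a b c d e f g h' i j, cs = [a, b, c, d, e, f, g, h', i, j] := by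
  rcases cs with _ | ⟨a, _ | ⟨b, _ | ⟨c, _ | ⟨d, _ | ⟨e, _ | ⟨f, _ | ⟨g, _ | ⟨h', _ | ⟨i, _ | ⟨j, _ | ⟨k, t⟩⟩⟩⟩⟩⟩⟩⟩⟩⟩⟩ <;>
    simp_all

-- the decode loop's accumulator factors out
theorem decodeB_factor (cs : List Char) (vals : List Int) :
    validIsbnDecodeB cs vals = (validIsbnDecodeB cs []).map (vals ++ ·) := by
  induction cs generalizing vals with
  | nil => simp [validIsbnDecodeB]
  | cons c cs ih =>
    simp only [validIsbnDecodeB, List.nil_append]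
    by_cases hd : PySem.Chars.isdigit c
    · rw [if_pos hd, if_pos hd, ih, ih [((c.toNat : Int) - 48)]]
      cases validIsbnDecodeB cs [] <;> simp
    · rw [if_neg hd, if_neg hd]; rfl

-- loop invariant: A's weighted sum over the tail = B's decode + double accumulation,
-- provided totalA = totB + t * (10 - i)  (t = running digit sum, totB = running double sum)
theorem goA_eq_B (cs : List Char) (last : Char) (i : Nat) (t totB totalA : Int)
    (hlen : i + cs.length = 9) (hst : totalA = totB + t * (10 - (i : Int))) :
    validIsbnGoA (cs ++ [last]) i totalA =
      match validIsbnDecodeB cs [] with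
      | none => false
      | some ds =>
        if last == 'X' || last == 'x' then
          PySem.Int.mod (validIsbnSumB (ds ++ [(10 : Int)]) t totB) 11 == 0
        else if PySem.Chars.isdigit last then
          PySem.Int.mod (validIsbnSumB (ds ++ [((last.toNat : Int) - 48)]) t totB) 11 == 0
        else false := by
  induction cs generalizing i t totB totalA with
  | nil =>
    have h9 : i = 9 := by simpa using hlen
    subst h9
    simp only [List.nil_append, validIsbnGoA, validIsbnDecodeB, validIsbnSumB]
    by_cases hx : (last == 'X' || last == 'x') = true
    · have harith : totalA + 10 * (10 - ((9 : Nat) : Int)) = totB + (t + 10) := by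
        rw [hst]; push_cast; ring
      rw [if_pos (by simp [hx]), if_pos hx, harith]
    · rw [if_neg (by simp_all), if_neg hx]
      by_cases hd : PySem.Chars.isdigit last
      · have harith : totalA + ((last.toNat : Int) - 48) * (10 - ((9 : Nat) : Int))
            = totB + (t + ((last.toNat : Int) - 48)) := by
          rw [hst]; push_cast; ring
        rw [if_pos hd, if_pos hd, harith]
      · rw [if_neg hd, if_neg hd]
  | cons c cs ih =>
    have hi : (i == 9) = false := by
      simp only [List.length_cons] at hlen
      simp only [beq_eq_false_iff_ne, ne_eq]; omega
    simp only [List.cons_append, validIsbnGoA, validIsbnDecodeB, hi, Bool.false_and,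
      Bool.false_eq_true, if_false, List.nil_append]
    by_cases hd : PySem.Chars.isdigit c
    · rw [if_pos hd, if_pos hd]
      rw [ih (i + 1) (t + ((c.toNat : Int) - 48)) (totB + (t + ((c.toNat : Int) - 48)))
            _ (by simp only [List.length_cons] at hlen; omega)
            (by push_cast; rw [hst]; ring)]
      rw [decodeB_factor cs [((c.toNat : Int) - 48)]]
      cases hds : validIsbnDecodeB cs [] with
      | none => rfl
      | some ds => rfl
    · rw [if_neg hd, if_neg hd]

-- ===== VERDICT (by name: the statement is the Claim_ definition above) =====
theorem valid_isbn10_spec : Claim_equal_valid_isbn10 := by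
  intro s _
  unfold Spec_valid_isbn10 valid_isbn10 valid_isbn10_alt
  by_cases h : s.toList.length = 10
  · obtain ⟨a, b, c, d, e, f, g, h', i, j, hcs⟩ := list_len10 s.toList h
    rw [hcs]
    rw [if_neg (by simp), if_neg (by simp)]
    have hslice : PySem.List.slice [a, b, c, d, e, f, g, h', i, j] none (some 9)
        = [a, b, c, d, e, f, g, h', i] := by
      simp [PySem.List.slice]
    have hget : PySem.List.pyGet? [a, b, c, d, e, f, g, h', i, j] (9 : Int) = some j := by
      simp [PySem.List.pyGet?, PySem.List.pyIdx?]
    rw [hslice, hget]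
    have := goA_eq_B [a, b, c, d, e, f, g, h', i] j 0 0 0 0 (by simp) (by ring)
    simp only [List.cons_append, List.nil_append] at this
    rw [this]
    cases hds : validIsbnDecodeB [a, b, c, d, e, f, g, h', i] [] with
    | none => rfl
    | some ds =>
      by_cases hx : (j == 'X' || j == 'x') = true
      · simp [hx]
      · by_cases hd : PySem.Chars.isdigit j
        · simp [hx, hd]
        · simp [hx, hd]
  · rw [if_pos h, if_pos h]
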